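-- pv_equiv track=rewrite | github.com/kingguuu8-svg/verilog-skill | stages/verilog-waveform-observation/scripts/waveform_support.py | build_alias_candidates
-- ===== SOURCE A (Python) =====
-- def build_alias_candidates(scope_path: list[str], base_name: str) -> list[str]:
--     full_parts = [*scope_path, base_name]
--     aliases: list[str] = []
--     for index in range(len(full_parts)):
--         alias = ".".join(full_parts[index:])
--         if alias not in aliases:
--             aliases.append(alias)
--     return aliases
-- ===== SOURCE B (Python) =====
-- def build_alias_candidates(scope_path: list[str], base_name: str) -> list[str]:
--     # Build each suffix join from the previous one, starting at the tail.
--     # Every suffix is strictly longer than the next (the extra part plus a dot),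
--     # so the joins are pairwise distinct and no dedup check is needed.
--     acc = base_name
--     out = [acc]
--     for part in reversed(scope_path):
--         acc = part + "." + acc
--         out.append(acc)
--     out.reverse()
--     return out
-- ===== Notes on version B (the rewrite author's own statement) =====
-- stated objective: faster
-- what changed: Instead of re-joining each suffix from scratch and scanning the output list for duplicates (which can never occur, since each suffix is strictly longer than the next), B extends one accumulator string from the tail and reverses the collected list once.
import Mathlib
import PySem

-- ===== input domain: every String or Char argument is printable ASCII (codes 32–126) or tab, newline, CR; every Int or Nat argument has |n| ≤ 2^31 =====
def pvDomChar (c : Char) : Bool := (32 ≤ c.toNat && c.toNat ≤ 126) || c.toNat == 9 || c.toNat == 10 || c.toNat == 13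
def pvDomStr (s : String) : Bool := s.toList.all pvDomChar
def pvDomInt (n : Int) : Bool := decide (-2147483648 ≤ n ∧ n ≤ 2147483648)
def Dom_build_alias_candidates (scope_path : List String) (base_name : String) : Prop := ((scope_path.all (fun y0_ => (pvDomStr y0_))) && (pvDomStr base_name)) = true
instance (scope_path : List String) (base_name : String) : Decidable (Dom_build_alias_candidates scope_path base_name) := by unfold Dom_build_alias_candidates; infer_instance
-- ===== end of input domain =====

-- B builds each suffix join from the previous one (tail-first) and skips A's duplicate
-- scan, which can never fire since each suffix is strictly longer than the next.

-- ===== PORT A =====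
def build_alias_candidates (scope_path : List String) (base_name : String) : List String :=
  let full_parts := scope_path ++ [base_name]
  (PySem.List.pyRange 0 (full_parts.length : Int) 1).foldl
    (fun aliases index =>
      let alias_ := PySem.Str.join "." (PySem.List.slice full_parts (some index) none)
      if alias_ ∈ aliases then aliases else aliases ++ [alias_]) []

-- ===== PORT B =====
def build_alias_candidates_alt (scope_path : List String) (base_name : String) : List String :=
  let st := scope_path.reverse.foldl
    (fun (st : String × List String) part =>
      let acc := part ++ "." ++ st.1
      (acc, st.2 ++ [acc]))
    (base_name, [base_name])
  st.2.reverse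

-- ===== PRECONDITION & SPEC =====
def Spec_build_alias_candidates (scope_path : List String) (base_name : String) (out : List String) : Prop := out = build_alias_candidates_alt scope_path base_name
instance (scope_path : List String) (base_name : String) (out : List String) : Decidable (Spec_build_alias_candidates scope_path base_name out) := by unfold Spec_build_alias_candidates; infer_instance

-- ===== CLAIM (what is proved, stated in full; the proofs are below) =====
def Claim_equal_build_alias_candidates : Prop := ∀ (scope_path : List String) (base_name : String), Dom_build_alias_candidates scope_path base_name → Spec_build_alias_candidates scope_path base_name (build_alias_candidates scope_path base_name)

-- ===== LEMMAS AND PROOFS =====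

-- Str-level facts about "."-joins
lemma strJoin_singleton (s : String) : PySem.Str.join "." [s] = s := by
  apply String.toList_inj.mp
  simp [PySem.Str.toList_join, PySem.Chars.join_singleton]

lemma strJoin_cons (p : String) (xs : List String) (h : xs ≠ []) :
    PySem.Str.join "." (p :: xs) = p ++ "." ++ PySem.Str.join "." xs := by
  obtain ⟨q, t, rfl⟩ := List.exists_cons_of_ne_nil h
  apply String.toList_inj.mp
  simp [PySem.Str.toList_join, PySem.Chars.join_cons_cons]

-- length of a join over a nonempty tail grows by |head| + 1
lemma strJoin_len_cons (p : String) (xs : List String) (h : xs ≠ []) :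
    (PySem.Str.join "." (p :: xs)).toList.length
      = p.toList.length + 1 + (PySem.Str.join "." xs).toList.length := by
  rw [strJoin_cons p xs h]
  simp
  omega

-- suffix joins have strictly decreasing length (for indices below the list length)
lemma strJoin_drop_lt (full : List String) (j k : ℕ) (hjk : j < k) (hk : k < full.length) :
    (PySem.Str.join "." (full.drop k)).toList.length
      < (PySem.Str.join "." (full.drop j)).toList.length := by
  induction k with
  | zero => omega
  | succ k ih =>
    have hadj : (PySem.Str.join "." (full.drop (k+1))).toList.length
        < (PySem.Str.join "." (full.drop k)).toList.length := by
      have hkl : k < full.length := by omega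
      have hdrop : full.drop k = full[k] :: full.drop (k+1) := List.drop_eq_getElem_cons hkl
      have hne : full.drop (k+1) ≠ [] := by
        intro hnil
        have := List.drop_eq_nil_iff.mp hnil
        omega
      rw [hdrop, strJoin_len_cons _ _ hne]
      omega
    rcases Nat.lt_or_ge j k with hjk' | hge
    · exact lt_trans hadj (ih hjk' (by omega))
    · have : j = k := by omega
      subst this
      exact hadj
-- the suffix joins are pairwise distinct
lemma nodup_suffix_joins (full : List String) :
    ((List.range full.length).map
      (fun k => PySem.Str.join "." (full.drop k))).Nodup := by
  apply List.Nodup.map_on _ (List.nodup_range)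
  intro j hj k hk hEq
  simp only [List.mem_range] at hj hk
  by_contra hne
  rcases Nat.lt_or_ge j k with h | h
  · have := strJoin_drop_lt full j k h hk
    rw [hEq] at this
    omega
  · have hlt : k < j := by omega
    have := strJoin_drop_lt full k j hlt hj
    rw [hEq] at this
    omega

-- a fold that appends g x unless already present is just map g when the images are distinct
lemma dedup_foldl {α β : Type} [DecidableEq β] (g : α → β) (l : List α) (acc : List β)
    (h : (acc ++ l.map g).Nodup) :
    l.foldl (fun a x => if g x ∈ a then a else a ++ [g x]) acc = acc ++ l.map g := by
  induction l generalizing acc with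
  | nil => simp
  | cons x l ih =>
    have hx : g x ∉ acc := by
      simp [List.nodup_append] at h
      intro hm
      exact (h.2.2 _ hm).1 rfl
    have h' : ((acc ++ [g x]) ++ l.map g).Nodup := by
      simpa using h
    simp only [List.foldl_cons, if_neg hx]
    rw [ih _ h']
    simp

-- A computes exactly the list of suffix joins
lemma portA_eq_map (scope_path : List String) (base_name : String) :
    build_alias_candidates scope_path base_name
      = (List.range (scope_path ++ [base_name]).length).map
          (fun k => PySem.Str.join "." ((scope_path ++ [base_name]).drop k)) := by
  unfold build_alias_candidates
  simp only [PySem.List.pyRange_one, Int.sub_zero, Int.toNat_natCast, List.foldl_map,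
    zero_add, PySem.List.slice_from_natCast]
  have := dedup_foldl (fun k => PySem.Str.join "." ((scope_path ++ [base_name]).drop k))
    (List.range (scope_path ++ [base_name]).length) []
    (by simpa using nodup_suffix_joins (scope_path ++ [base_name]))
  simpa using this

-- invariant of B's fold: accumulator is the full join, output holds the suffix joins tail-first
lemma portB_fold (sp : List String) (base : String) :
    sp.reverse.foldl
        (fun (st : String × List String) part =>
          let acc := part ++ "." ++ st.1
          (acc, st.2 ++ [acc]))
        (base, [base])
      = (PySem.Str.join "." (sp ++ [base]),
         (List.range (sp.length + 1)).map
           (fun i => PySem.Str.join "." ((sp ++ [base]).drop (sp.length - i)))) := by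
  induction sp with
  | nil =>
    simp only [List.reverse_nil, List.foldl_nil, List.length_nil, List.nil_append,
      Nat.zero_add, List.range_one, List.map_cons, List.map_nil, Nat.sub_zero,
      List.drop_zero]
    rw [strJoin_singleton]
  | cons p sp ih =>
    have hne : sp ++ [base] ≠ [] := by simp
    rw [List.reverse_cons, List.foldl_append, ih]
    simp only [List.foldl_cons, List.foldl_nil, Prod.mk.injEq]
    constructor
    · rw [← strJoin_cons p (sp ++ [base]) hne]
      rfl
    · have hlen : (p :: sp).length = sp.length + 1 := rfl
      rw [hlen]
      conv_rhs => rw [List.range_succ, List.map_append]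
      congr 1
      · apply List.map_congr_left
        intro i hi
        simp only [List.mem_range] at hi
        have hdrop : ((p :: sp) ++ [base]).drop (sp.length + 1 - i)
            = (sp ++ [base]).drop (sp.length - i) := by
          have : sp.length + 1 - i = (sp.length - i) + 1 := by omega
          rw [this]
          rfl
        rw [hdrop]
      · simp [strJoin_cons p (sp ++ [base]) hne]

-- B equals the same list of suffix joins
lemma portB_eq_map (scope_path : List String) (base_name : String) :
    build_alias_candidates_alt scope_path base_name
      = (List.range (scope_path ++ [base_name]).length).map
          (fun k => PySem.Str.join "." ((scope_path ++ [base_name]).drop k)) := by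
  unfold build_alias_candidates_alt
  rw [portB_fold]
  apply List.ext_getElem
  · simp
  · intro k h1 h2
    simp only [List.getElem_reverse, List.getElem_map, List.getElem_range]
    congr 1
    simp at h1 h2 ⊢
    omega

-- ===== VERDICT (by name: the statement is the Claim_ definition above) =====
theorem build_alias_candidates_spec : Claim_equal_build_alias_candidates := by
  intro scope_path base_name _
  unfold Spec_build_alias_candidates
  rw [portA_eq_map, portB_eq_map]
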